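-- pv_equiv track=rewrite | github.com/simogasp/covid19-veneto | scripts/generateJson.py | generate_summary_by_province
-- ===== SOURCE A (Python) =====
-- def generate_summary_by_province(hospital_dict: dict, hospital_info: dict) -> dict:
--
--     summary = {}
--
--     for hospital, categories in hospital_dict.items():
--         province = hospital_info[hospital]['province']
--         if province not in summary:
--             summary[province] = {}
--         for category, data in categories.items():
--             if category not in summary[province]:
--                 summary[province][category] = {}
--             for date, value in data.items():
--                 summary[province][category][date] = value + summary[province][category].get(date, 0)
--
--     return summary
-- ===== SOURCE B (Python) =====
-- def generate_summary_by_province(hospital_dict: dict, hospital_info: dict) -> dict: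
--     # Two-pass decomposition: first list the provinces in first-seen order,
--     # then build each province's merged table independently.
--     provinces = list(dict.fromkeys(hospital_info[h]['province'] for h in hospital_dict))
--     summary = {}
--     for p in provinces:
--         merged = {}
--         for hospital, categories in hospital_dict.items():
--             if hospital_info[hospital]['province'] != p:
--                 continue
--             for category, data in categories.items():
--                 md = merged.setdefault(category, {})
--                 for date, value in data.items():
--                     md[date] = value + md.get(date, 0)
--         summary[p] = merged
--     return summary
-- ===== Notes on version B (the rewrite author's own statement) =====
-- stated objective: alternative
-- what changed: B replaces A's single interleaved triple-nested accumulation with a two-pass per-province decomposition: it first lists the provinces in first-seen order, then builds each province's category/date table by an independent scan of hospital_dict restricted to that province.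
import Mathlib
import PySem

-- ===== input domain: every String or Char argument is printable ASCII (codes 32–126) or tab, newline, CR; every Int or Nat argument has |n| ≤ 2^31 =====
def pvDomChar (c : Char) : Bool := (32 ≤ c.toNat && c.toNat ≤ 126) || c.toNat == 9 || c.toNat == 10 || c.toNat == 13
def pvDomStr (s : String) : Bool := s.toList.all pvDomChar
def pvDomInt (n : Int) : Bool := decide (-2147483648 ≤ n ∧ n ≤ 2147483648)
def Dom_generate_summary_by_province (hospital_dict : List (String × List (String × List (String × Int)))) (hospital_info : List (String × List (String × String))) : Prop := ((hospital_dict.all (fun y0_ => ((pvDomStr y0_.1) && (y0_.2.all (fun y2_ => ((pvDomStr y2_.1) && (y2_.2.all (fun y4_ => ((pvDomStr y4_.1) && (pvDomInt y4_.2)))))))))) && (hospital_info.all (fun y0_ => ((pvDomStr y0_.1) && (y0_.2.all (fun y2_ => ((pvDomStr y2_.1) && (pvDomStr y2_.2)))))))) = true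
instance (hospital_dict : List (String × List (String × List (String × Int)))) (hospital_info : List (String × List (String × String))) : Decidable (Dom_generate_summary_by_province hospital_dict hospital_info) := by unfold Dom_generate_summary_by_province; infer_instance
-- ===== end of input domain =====

-- B regroups the work per province (list the provinces first, then build each
-- province's table independently); objective: alternative decomposition, not speed.

-- shared helper: hospital_info[hospital]['province'] (total stand-in; Pre_ excludes the KeyError inputs)
def pvProvince (hospital_info : List (String × List (String × String))) (h : String) : String :=
  (((PySem.Dict.mk hospital_info).get? h).bind fun d => (PySem.Dict.mk d).get? "province").getD ""

-- ===== PORT A =====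
-- summary[province][category][date] = value + summary[province][category].get(date, 0)
def aDateStep (p c : String) (s : PySem.Dict String (PySem.Dict String (PySem.Dict String Int))) (dv : String × Int) : PySem.Dict String (PySem.Dict String (PySem.Dict String Int)) :=
  let m := s.getD p PySem.Dict.empty
  let md := m.getD c PySem.Dict.empty
  s.insert p (m.insert c (md.insert dv.1 (dv.2 + md.getD dv.1 0)))

-- if category not in summary[province]: summary[province][category] = {}; then the date loop
def aCatStep (p : String) (s : PySem.Dict String (PySem.Dict String (PySem.Dict String Int))) (cd : String × List (String × Int)) : PySem.Dict String (PySem.Dict String (PySem.Dict String Int)) :=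
  let s1 := if (s.getD p PySem.Dict.empty).contains cd.1 then s
            else s.insert p ((s.getD p PySem.Dict.empty).insert cd.1 PySem.Dict.empty)
  cd.2.foldl (aDateStep p cd.1) s1

-- per hospital: province lookup, 'if province not in summary: summary[province] = {}', then the category loop
def aHospStep (hospital_info : List (String × List (String × String))) (s : PySem.Dict String (PySem.Dict String (PySem.Dict String Int))) (x : String × List (String × List (String × Int))) : PySem.Dict String (PySem.Dict String (PySem.Dict String Int)) :=
  let p := pvProvince hospital_info x.1
  let s1 := if s.contains p then s else s.insert p PySem.Dict.empty
  x.2.foldl (aCatStep p) s1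

def generate_summary_by_province (hospital_dict : List (String × List (String × List (String × Int)))) (hospital_info : List (String × List (String × String))) : List (String × List (String × List (String × Int))) :=
  (hospital_dict.foldl (aHospStep hospital_info) PySem.Dict.empty).items.map
    (fun pm => (pm.1, pm.2.items.map (fun cm => (cm.1, cm.2.items))))

-- ===== PORT B =====
-- md[date] = value + md.get(date, 0)
def bDateStep (md : PySem.Dict String Int) (dv : String × Int) : PySem.Dict String Int :=
  md.insert dv.1 (dv.2 + md.getD dv.1 0)

-- md = merged.setdefault(category, {}); the date loop mutates md in place
def bCatStep (m : PySem.Dict String (PySem.Dict String Int)) (cd : String × List (String × Int)) : PySem.Dict String (PySem.Dict String Int) :=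
  let m1 := m.setdefault cd.1 PySem.Dict.empty
  let md := m1.getD cd.1 PySem.Dict.empty
  m1.insert cd.1 (cd.2.foldl bDateStep md)

-- one province's merged table: scan hospital_dict, skipping other provinces
def bMerge (hospital_dict : List (String × List (String × List (String × Int)))) (hospital_info : List (String × List (String × String))) (p : String) : PySem.Dict String (PySem.Dict String Int) :=
  hospital_dict.foldl
    (fun m x => if pvProvince hospital_info x.1 ≠ p then m else x.2.foldl bCatStep m)
    PySem.Dict.empty

def generate_summary_by_province_alt (hospital_dict : List (String × List (String × List (String × Int)))) (hospital_info : List (String × List (String × String))) : List (String × List (String × List (String × Int))) :=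
  let provinces := PySem.List.dedup (hospital_dict.map fun x => pvProvince hospital_info x.1)
  let summary := provinces.foldl
    (fun s p => s.insert p (bMerge hospital_dict hospital_info p))
    (PySem.Dict.empty : PySem.Dict String (PySem.Dict String (PySem.Dict String Int)))
  summary.items.map (fun pm => (pm.1, pm.2.items.map (fun cm => (cm.1, cm.2.items))))

-- ===== PRECONDITION & SPEC =====
-- Pre_ excludes (a) association lists with duplicate keys at any level (they do not represent a
-- Python dict, whose keys are unique) and (b) inputs where some hospital of hospital_dict is
-- missing from hospital_info or lacks a 'province' entry, on which the Python A raises KeyError.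
def Pre_generate_summary_by_province (hospital_dict : List (String × List (String × List (String × Int)))) (hospital_info : List (String × List (String × String))) : Prop :=
  (hospital_dict.map Prod.fst).Nodup ∧ (hospital_info.map Prod.fst).Nodup ∧
  (∀ e ∈ hospital_info, (e.2.map Prod.fst).Nodup) ∧
  (∀ x ∈ hospital_dict, (x.2.map Prod.fst).Nodup ∧ ∀ cd ∈ x.2, (cd.2.map Prod.fst).Nodup) ∧
  (∀ x ∈ hospital_dict, ∃ e ∈ hospital_info, e.1 = x.1 ∧ "province" ∈ e.2.map Prod.fst)
instance (hospital_dict : List (String × List (String × List (String × Int)))) (hospital_info : List (String × List (String × String))) : Decidable (Pre_generate_summary_by_province hospital_dict hospital_info) := by unfold Pre_generate_summary_by_province; infer_instance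

def pvWitness_generate_summary_by_province : (List (String × List (String × List (String × Int)))) × (List (String × List (String × String))) :=
  ([("h1", [("icu", [("2020-03-01", 3)])]), ("h2", [])],
   [("h1", [("province", "PD")]), ("h2", [("province", "VE")])])

def Spec_generate_summary_by_province (hospital_dict : List (String × List (String × List (String × Int)))) (hospital_info : List (String × List (String × String))) (out : List (String × List (String × List (String × Int)))) : Prop := out = generate_summary_by_province_alt hospital_dict hospital_info
instance (hospital_dict : List (String × List (String × List (String × Int)))) (hospital_info : List (String × List (String × String))) (out : List (String × List (String × List (String × Int)))) : Decidable (Spec_generate_summary_by_province hospital_dict hospital_info out) := by unfold Spec_generate_summary_by_province; infer_instance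

-- ===== CLAIM (what is proved, stated in full; the proofs are below) =====
def Claim_equal_generate_summary_by_province : Prop := ∀ (hospital_dict : List (String × List (String × List (String × Int)))) (hospital_info : List (String × List (String × String))), Dom_generate_summary_by_province hospital_dict hospital_info → Pre_generate_summary_by_province hospital_dict hospital_info → Spec_generate_summary_by_province hospital_dict hospital_info (generate_summary_by_province hospital_dict hospital_info)

-- ===== LEMMAS AND PROOFS =====

-- the common per-category step both loops reduce to
def cstep (m : PySem.Dict String (PySem.Dict String Int)) (cd : String × List (String × Int)) : PySem.Dict String (PySem.Dict String Int) :=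
  m.insert cd.1 (cd.2.foldl bDateStep (m.getD cd.1 PySem.Dict.empty))

-- the canonical per-hospital step A's body reduces to
def tstep (pv : String → String) (s : PySem.Dict String (PySem.Dict String (PySem.Dict String Int))) (x : String × List (String × List (String × Int))) : PySem.Dict String (PySem.Dict String (PySem.Dict String Int)) :=
  s.insert (pv x.1) (x.2.foldl cstep (s.getD (pv x.1) PySem.Dict.empty))

-- invariant of A's accumulator: unique keys at the two outer levels
def pvInv (s : PySem.Dict String (PySem.Dict String (PySem.Dict String Int))) : Prop :=
  s.keys.Nodup ∧ ∀ m ∈ s.values, m.keys.Nodup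

lemma insert_getD_self_eq {ν : Type} (d : PySem.Dict String ν) (p : String) (d0 : ν)
    (hc : d.contains p = true) (hnd : d.keys.Nodup) : d.insert p (d.getD p d0) = d := by
  apply PySem.Dict.ext
  rw [PySem.Dict.items_insert_of_contains d _ hc]
  calc List.map (fun q => if (q.1 == p) = true then (p, d.getD p d0) else q) d.items
      = List.map id d.items := by
        apply List.map_congr_left
        intro q hq
        by_cases h : q.1 = p
        · have : d.getD p d0 = q.2 := by
            have hmem : (p, q.2) ∈ d.items := by rw [← h]; exact hq
            exact PySem.Dict.getD_of_mem_items d hmem hnd d0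
          subst h
          simp [this]
        · simp [h]
    _ = d.items := List.map_id d.items

lemma hoistP {ν β : Type} (p : String) (d0 : ν) (f : ν → β → ν)
    (P : PySem.Dict String ν → Prop)
    (step : PySem.Dict String ν → β → PySem.Dict String ν)
    (hstep : ∀ s x, s.contains p = true → s.keys.Nodup → P s → step s x = s.insert p (f (s.getD p d0) x))
    (hP : ∀ s x, s.contains p = true → s.keys.Nodup → P s → P (s.insert p (f (s.getD p d0) x))) :
    ∀ (l : List β) (s : PySem.Dict String ν), s.contains p = true → s.keys.Nodup → P s →
      l.foldl step s = s.insert p (l.foldl f (s.getD p d0)) := by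
  intro l
  induction l with
  | nil => intro s hc hnd _; simp; exact (insert_getD_self_eq s p d0 hc hnd).symm
  | cons x xs ih =>
    intro s hc hnd hPs
    have h1 : (x :: xs).foldl step s = xs.foldl step (step s x) := rfl
    rw [h1, hstep s x hc hnd hPs]
    rw [ih (s.insert p (f (s.getD p d0) x))
        (PySem.Dict.contains_insert_self s p _)
        (by rw [PySem.Dict.keys_insert_of_contains s _ hc]; exact hnd)
        (hP s x hc hnd hPs)]
    rw [PySem.Dict.getD_insert_self, PySem.Dict.insert_insert_self]
    rfl

lemma bCatStep_eq_cstep (m : PySem.Dict String (PySem.Dict String Int)) (cd : String × List (String × Int)) :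
    bCatStep m cd = cstep m cd := by
  show (m.setdefault cd.1 PySem.Dict.empty).insert cd.1
      (cd.2.foldl bDateStep ((m.setdefault cd.1 PySem.Dict.empty).getD cd.1 PySem.Dict.empty))
    = cstep m cd
  by_cases hc : m.contains cd.1 = true
  · rw [PySem.Dict.setdefault_of_contains m _ hc]; rfl
  · rw [PySem.Dict.setdefault_of_not_contains m _ (by simp_all)]
    rw [PySem.Dict.getD_insert_self, PySem.Dict.insert_insert_self]
    unfold cstep
    rw [PySem.Dict.getD_of_not_contains m _ (by simp_all)]

lemma catStep_eq (p : String) (s : PySem.Dict String (PySem.Dict String (PySem.Dict String Int)))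
    (cd : String × List (String × Int))
    (hc : s.contains p = true) (hnd : s.keys.Nodup)
    (hm : (s.getD p PySem.Dict.empty).keys.Nodup) :
    aCatStep p s cd = s.insert p (cstep (s.getD p PySem.Dict.empty) cd) := by
  show cd.2.foldl (aDateStep p cd.1)
      (if (s.getD p PySem.Dict.empty).contains cd.1 then s
       else s.insert p ((s.getD p PySem.Dict.empty).insert cd.1 PySem.Dict.empty))
    = s.insert p (cstep (s.getD p PySem.Dict.empty) cd)
  have hdate : ∀ (l : List (String × Int)) (s' : PySem.Dict String (PySem.Dict String (PySem.Dict String Int))),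
      s'.contains p = true → s'.keys.Nodup →
      l.foldl (aDateStep p cd.1) s' =
        s'.insert p (l.foldl (fun m dv => m.insert cd.1 (bDateStep (m.getD cd.1 PySem.Dict.empty) dv)) (s'.getD p PySem.Dict.empty)) := by
    intro l s' hc' hnd'
    exact hoistP p PySem.Dict.empty
      (fun m dv => m.insert cd.1 (bDateStep (m.getD cd.1 PySem.Dict.empty) dv))
      (fun _ => True) (aDateStep p cd.1)
      (fun s x _ _ _ => rfl) (fun _ _ _ _ _ => trivial) l s' hc' hnd' trivial
  have hinner : ∀ (l : List (String × Int)) (m : PySem.Dict String (PySem.Dict String Int)),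
      m.contains cd.1 = true → m.keys.Nodup →
      l.foldl (fun m dv => m.insert cd.1 (bDateStep (m.getD cd.1 PySem.Dict.empty) dv)) m =
        m.insert cd.1 (l.foldl bDateStep (m.getD cd.1 PySem.Dict.empty)) := by
    intro l m hcm hndm
    exact hoistP cd.1 PySem.Dict.empty bDateStep (fun _ => True)
      (fun m dv => m.insert cd.1 (bDateStep (m.getD cd.1 PySem.Dict.empty) dv))
      (fun s x _ _ _ => rfl) (fun _ _ _ _ _ => trivial) l m hcm hndm trivial
  by_cases hcc : (s.getD p PySem.Dict.empty).contains cd.1 = true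
  · rw [if_pos hcc]
    rw [hdate cd.2 s hc hnd]
    rw [hinner cd.2 _ hcc hm]
    rfl
  · rw [if_neg hcc]
    have hcc' : (s.getD p PySem.Dict.empty).contains cd.1 = false := by simp_all
    rw [hdate cd.2 _ (PySem.Dict.contains_insert_self s p _)
        (by
          by_cases h2 : s.contains p = true
          · rw [PySem.Dict.keys_insert_of_contains s _ h2]; exact hnd
          · exact PySem.Dict.nodup_keys_insert s p _ hnd)]
    rw [PySem.Dict.getD_insert_self, PySem.Dict.insert_insert_self]
    rw [hinner cd.2 _ (PySem.Dict.contains_insert_self _ cd.1 _)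
        (PySem.Dict.nodup_keys_insert _ cd.1 _ hm)]
    rw [PySem.Dict.getD_insert_self, PySem.Dict.insert_insert_self]
    unfold cstep
    rw [PySem.Dict.getD_of_not_contains _ _ hcc']

lemma getD_keys_nodup (s : PySem.Dict String (PySem.Dict String (PySem.Dict String Int)))
    (h : pvInv s) (q : String) : (s.getD q PySem.Dict.empty).keys.Nodup := by
  by_cases hc : s.contains q = true
  · have h1 : (s.get? q).isSome := by rw [← PySem.Dict.contains_eq_isSome_get?]; exact hc
    rcases Option.isSome_iff_exists.mp h1 with ⟨v, hv⟩
    rw [PySem.Dict.getD_eq_get?_getD, hv]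
    have hmem : v ∈ s.values := by
      have := PySem.Dict.mem_items_of_get?_eq_some s hv
      simp only [PySem.Dict.values]
      exact List.mem_map.mpr ⟨(q, v), this, rfl⟩
    exact h.2 v hmem
  · rw [PySem.Dict.getD_of_not_contains s _ (by simp_all)]
    simp [PySem.Dict.keys_empty]

lemma cstepFold_nodup (l : List (String × List (String × Int))) (m : PySem.Dict String (PySem.Dict String Int))
    (h : m.keys.Nodup) : (l.foldl cstep m).keys.Nodup := by
  show (List.foldl (fun d x => d.insert x.1 (x.2.foldl bDateStep (d.getD x.1 PySem.Dict.empty))) m l).keys.Nodup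
  exact PySem.Dict.nodup_keys_foldl_insert_key l Prod.fst _ m h

lemma hospStep_eq (hospital_info : List (String × List (String × String)))
    (s : PySem.Dict String (PySem.Dict String (PySem.Dict String Int)))
    (x : String × List (String × List (String × Int))) (h : pvInv s) :
    aHospStep hospital_info s x = tstep (pvProvince hospital_info) s x := by
  have hgoal : ∀ (p : String),
      x.2.foldl (aCatStep p) (if s.contains p then s else s.insert p PySem.Dict.empty)
        = s.insert p (x.2.foldl cstep (s.getD p PySem.Dict.empty)) := by
    intro p
    have hcats : ∀ (s' : PySem.Dict String (PySem.Dict String (PySem.Dict String Int))),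
        s'.contains p = true → s'.keys.Nodup → (s'.getD p PySem.Dict.empty).keys.Nodup →
        x.2.foldl (aCatStep p) s' = s'.insert p (x.2.foldl cstep (s'.getD p PySem.Dict.empty)) := by
      intro s' hc hnd hm
      exact hoistP p PySem.Dict.empty cstep (fun s => (s.getD p PySem.Dict.empty).keys.Nodup)
        (aCatStep p)
        (fun s x hc hnd hm => catStep_eq p s x hc hnd hm)
        (fun s cd hc hnd hm => by
          show ((s.insert p (cstep (s.getD p PySem.Dict.empty) cd)).getD p PySem.Dict.empty).keys.Nodup
          rw [PySem.Dict.getD_insert_self]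
          exact PySem.Dict.nodup_keys_insert _ _ _ hm)
        x.2 s' hc hnd hm
    by_cases hc : s.contains p = true
    · rw [if_pos hc]
      exact hcats s hc h.1 (getD_keys_nodup s h p)
    · rw [if_neg hc]
      have hc' : s.contains p = false := by simp_all
      rw [hcats (s.insert p PySem.Dict.empty) (PySem.Dict.contains_insert_self s p _)
          (PySem.Dict.nodup_keys_insert s p _ h.1)
          (by rw [PySem.Dict.getD_insert_self]; simp [PySem.Dict.keys_empty])]
      rw [PySem.Dict.getD_insert_self, PySem.Dict.insert_insert_self,
          PySem.Dict.getD_of_not_contains s _ hc']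
  exact hgoal (pvProvince hospital_info x.1)

lemma pvInv_tstep (pv : String → String) (s : PySem.Dict String (PySem.Dict String (PySem.Dict String Int)))
    (x : String × List (String × List (String × Int))) (h : pvInv s) : pvInv (tstep pv s x) := by
  constructor
  · exact PySem.Dict.nodup_keys_insert s _ _ h.1
  · intro m hm
    rcases PySem.Dict.mem_values_insert s _ _ m hm with h1 | h1
    · rw [h1]
      exact cstepFold_nodup x.2 _ (getD_keys_nodup s h _)
    · exact h.2 m h1

lemma afold_eq (hospital_info : List (String × List (String × String))) :
    ∀ (l : List (String × List (String × List (String × Int))))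
      (s : PySem.Dict String (PySem.Dict String (PySem.Dict String Int))), pvInv s →
      l.foldl (aHospStep hospital_info) s = l.foldl (tstep (pvProvince hospital_info)) s := by
  intro l
  induction l with
  | nil => intro s _; rfl
  | cons x xs ih =>
    intro s hs
    show xs.foldl (aHospStep hospital_info) (aHospStep hospital_info s x)
        = xs.foldl (tstep (pvProvince hospital_info)) (tstep (pvProvince hospital_info) s x)
    rw [hospStep_eq hospital_info s x hs]
    exact ih _ (pvInv_tstep _ s x hs)

lemma tfold_getD (pv : String → String) :
    ∀ (l : List (String × List (String × List (String × Int))))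
      (d : PySem.Dict String (PySem.Dict String (PySem.Dict String Int))) (q : String),
      (l.foldl (tstep pv) d).getD q PySem.Dict.empty =
        (l.filter fun x => pv x.1 == q).foldl (fun m x => x.2.foldl cstep m) (d.getD q PySem.Dict.empty) := by
  intro l
  induction l with
  | nil => intro d q; rfl
  | cons x xs ih =>
    intro d q
    show (xs.foldl (tstep pv) (tstep pv d x)).getD q PySem.Dict.empty = _
    rw [ih (tstep pv d x) q]
    unfold tstep
    by_cases h : pv x.1 = q
    · subst h
      rw [PySem.Dict.getD_insert_self]
      simp
    · rw [PySem.Dict.getD_insert d _ q]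
      rw [if_neg (fun hh => h hh.symm)]
      have : (pv x.1 == q) = false := by simp [h]
      simp [this]

lemma tfold_keys (pv : String → String) (l : List (String × List (String × List (String × Int)))) :
    (l.foldl (tstep pv) PySem.Dict.empty).keys = PySem.List.dedup (l.map fun x => pv x.1) := by
  have h : (List.foldl (fun (d : PySem.Dict String (PySem.Dict String (PySem.Dict String Int))) x => d.insert (pv x.1) (x.2.foldl cstep (d.getD (pv x.1) PySem.Dict.empty))) PySem.Dict.empty l).keys
      = PySem.Set.update PySem.Dict.empty.keys (l.map fun x => pv x.1) :=
    PySem.Dict.keys_foldl_insert_key l (fun x => pv x.1) _ PySem.Dict.empty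
  show (List.foldl (fun d x => d.insert (pv x.1) (x.2.foldl cstep (d.getD (pv x.1) PySem.Dict.empty))) PySem.Dict.empty l).keys = _
  rw [h, PySem.Dict.keys_empty, PySem.Set.update_nil_left, PySem.List.dedup_eq_ofList]

lemma bMerge_eq (hospital_dict : List (String × List (String × List (String × Int))))
    (hospital_info : List (String × List (String × String))) (q : String) :
    bMerge hospital_dict hospital_info q =
      (hospital_dict.filter fun x => pvProvince hospital_info x.1 == q).foldl
        (fun m x => x.2.foldl cstep m) PySem.Dict.empty := by
  unfold bMerge
  rw [List.foldl_filter]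
  congr 1
  funext m x
  by_cases h : pvProvince hospital_info x.1 = q
  · have hb : (pvProvince hospital_info x.1 == q) = true := by simp [h]
    rw [if_pos hb, if_neg (by simpa using h)]
    congr 1
    funext m' cd
    exact bCatStep_eq_cstep m' cd
  · have hb : (pvProvince hospital_info x.1 == q) = false := by simp [h]
    rw [hb]
    simp [h]

-- ===== VERDICT (by name: the statement is the Claim_ definition above) =====
theorem generate_summary_by_province_spec : Claim_equal_generate_summary_by_province := by
  intro hd hi _ _
  unfold Spec_generate_summary_by_province
  unfold generate_summary_by_province generate_summary_by_province_alt
  have hmain : hd.foldl (aHospStep hi) PySem.Dict.empty =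
      (PySem.List.dedup (hd.map fun x => pvProvince hi x.1)).foldl
        (fun s p => s.insert p (bMerge hd hi p)) PySem.Dict.empty := by
    rw [afold_eq hi hd PySem.Dict.empty ⟨by simp [PySem.Dict.keys_empty], by simp [PySem.Dict.values, PySem.Dict.empty]⟩]
    apply PySem.Dict.ext
    have hkeys := tfold_keys (pvProvince hi) hd
    have hnd : (hd.foldl (tstep (pvProvince hi)) PySem.Dict.empty).keys.Nodup := by
      rw [hkeys]; exact PySem.List.nodup_dedup _
    rw [PySem.Dict.items_eq_map_keys _ hnd PySem.Dict.empty, hkeys]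
    have hfresh : (List.foldl (fun (d : PySem.Dict String (PySem.Dict String (PySem.Dict String Int))) p => d.insert p (bMerge hd hi p)) PySem.Dict.empty (PySem.List.dedup (hd.map fun x => pvProvince hi x.1))).items
        = PySem.Dict.empty.items ++ (PySem.List.dedup (hd.map fun x => pvProvince hi x.1)).map (fun p => (p, bMerge hd hi p)) :=
      PySem.Dict.items_foldl_insert_fresh _ id (fun p => bMerge hd hi p) PySem.Dict.empty
        (fun a _ => PySem.Dict.contains_empty a)
        (by simp only [List.map_id]; exact PySem.List.nodup_dedup (hd.map fun x => pvProvince hi x.1))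
    rw [hfresh]
    have hempty : (PySem.Dict.empty : PySem.Dict String (PySem.Dict String (PySem.Dict String Int))).items = [] := rfl
    rw [hempty, List.nil_append]
    apply List.map_congr_left
    intro q _
    rw [tfold_getD (pvProvince hi) hd PySem.Dict.empty q]
    rw [bMerge_eq hd hi q]
    have : (PySem.Dict.empty : PySem.Dict String (PySem.Dict String (PySem.Dict String Int))).getD q PySem.Dict.empty = PySem.Dict.empty :=
      PySem.Dict.getD_of_not_contains _ _ (PySem.Dict.contains_empty q)
    rw [this]
  rw [hmain]
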